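-- pv_equiv track=rewrite | github.com/Marianadaso3/Lab1-DLP | lexer.py | formato
-- ===== SOURCE A (Python) =====
-- def formato(entrada):
--     simbolos = ['|', '*', '+', '?']  # lista de operadores
--     resultado = []  # lista para guardar el resultado
--     entrada = '(' + entrada + ')'  # añade paréntesis al principio y final para facilitar el procesamiento
--
--     for i in range(len(entrada)):
--         if entrada[i] in simbolos or entrada[i] == '(' or entrada[i] == ')':
--             resultado.append(entrada[i])
--         else:
--             resultado.append('•' + entrada[i] + '•')
--
--     resultado = ''.join(resultado)  # une los caracteres en una sola cadena
--     resultado = resultado.replace('(•', '(')  # elimina puntos intermedios redundantes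
--     resultado = resultado.replace('•)', ')')
--     resultado = resultado.replace('••', '•')  # elimina dobles puntos intermedios
--     resultado = resultado[1:-1]  # elimina los paréntesis añadidos al principio y final
--     return resultado
-- ===== SOURCE B (Python) =====
-- def formato(entrada):
--     # One pass: emit each char; insert '\u2022' between adjacent chars (p, c)
--     # exactly when at least one of them is a literal, unless p is '(' or c is ')'.
--     simbolos = {'|', '*', '+', '?', '(', ')'}
--     out = []
--     prev = None
--     for c in entrada:
--         if prev is not None and (prev not in simbolos or c not in simbolos) \
--                 and prev != '(' and c != ')':
--             out.append('\u2022')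
--         out.append(c)
--         prev = c
--     return ''.join(out)
-- ===== Notes on version B (the rewrite author's own statement) =====
-- stated objective: faster
-- what changed: A pads the string with parentheses, wraps every literal character in '•' markers, then collapses/deletes the redundant markers with three sequential str.replace passes and strips the padding; B makes a single scan over the original string and inserts '•' between each adjacent pair of characters exactly when the pair requires it.
import Mathlib
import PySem

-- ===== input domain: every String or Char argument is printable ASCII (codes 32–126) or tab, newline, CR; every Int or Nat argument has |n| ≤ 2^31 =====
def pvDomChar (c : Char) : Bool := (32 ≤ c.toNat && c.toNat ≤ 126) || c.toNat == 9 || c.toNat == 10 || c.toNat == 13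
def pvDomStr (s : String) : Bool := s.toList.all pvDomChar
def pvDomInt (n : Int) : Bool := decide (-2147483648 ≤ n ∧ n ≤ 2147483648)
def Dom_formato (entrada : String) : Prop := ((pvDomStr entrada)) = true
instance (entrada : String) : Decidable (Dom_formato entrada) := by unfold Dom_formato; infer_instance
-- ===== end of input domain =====

-- B replaces A's pad-with-parens / mark-every-literal / three-replace-collapse pipeline by a single
-- scan that decides each '•' insertion from the adjacent pair of characters (objective: faster, measured).

-- ===== PORT A =====
-- literal port of A: pad with parens, wrap each non-symbol char in '•', join, three replaces, strip ends
def formato (entrada : String) : String :=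
  let simbolos : List Char := ['|', '*', '+', '?']
  let entrada2 : List Char := ('(' :: entrada.toList) ++ [')']
  let resultado : List (List Char) :=
    (PySem.List.pyRange 0 (PySem.List.len entrada2) 1).foldl
      (fun acc i =>
        let c := PySem.List.pyGetD entrada2 i ' '
        if c ∈ simbolos ∨ c = '(' ∨ c = ')' then acc ++ [[c]]
        else acc ++ [['•', c, '•']]) []
  let r1 : List Char := PySem.Chars.join [] resultado
  let r2 := PySem.Chars.replace r1 ['(', '•'] ['(']
  let r3 := PySem.Chars.replace r2 ['•', ')'] [')']
  let r4 := PySem.Chars.replace r3 ['•', '•'] ['•']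
  String.ofList (PySem.Chars.slice r4 (some 1) (some (-1)))

-- ===== PORT B =====
-- Source B's set literal of regex symbols
def simbB : List Char := ['|', '*', '+', '?', '(', ')']

-- Source B's loop: prev is None before the first character, then the previous character
def altGo (prev : Option Char) : List Char → List Char
  | [] => []
  | c :: t =>
    (match prev with
     | some p => if (p ∉ simbB ∨ c ∉ simbB) ∧ p ≠ '(' ∧ c ≠ ')' then ['•'] else []
     | none => []) ++ c :: altGo (some c) t

def formato_alt (entrada : String) : String :=
  String.ofList (altGo none entrada.toList)

-- ===== PRECONDITION & SPEC =====
def Spec_formato (entrada : String) (out : String) : Prop := out = formato_alt entrada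
instance (entrada : String) (out : String) : Decidable (Spec_formato entrada out) := by unfold Spec_formato; infer_instance

-- ===== CLAIM (what is proved, stated in full; the proofs are below) =====
def Claim_equal_formato : Prop := ∀ (entrada : String), Dom_formato entrada → Spec_formato entrada (formato entrada)

-- ===== LEMMAS AND PROOFS =====
def rep2 (a b r : Char) : List Char → List Char
  | x :: y :: t => if x = a ∧ y = b then r :: rep2 a b r t else x :: rep2 a b r (y :: t)
  | l => l
lemma rep2_one (a b r x : Char) : rep2 a b r [x] = [x] := by simp [rep2]
lemma rep2_cons₂ (a b r x y : Char) (t : List Char) :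
    rep2 a b r (x :: y :: t) = if x = a ∧ y = b then r :: rep2 a b r t else x :: rep2 a b r (y :: t) := by
  simp [rep2]

lemma go_eq_rep2 (a b r : Char) :
    ∀ (fuel : Nat) (l acc : List Char), l.length ≤ fuel →
      PySem.Chars.replace.go [a, b] [r] fuel l acc = acc.reverse ++ rep2 a b r l := by
  intro fuel
  induction fuel with
  | zero =>
      intro l acc h
      have : l = [] := by cases l <;> simp_all
      subst this
      rw [PySem.Chars.replace.go.eq_def]
      simp [rep2]
  | succ n ih =>
      intro l acc h
      rw [PySem.Chars.replace.go.eq_def]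
      cases l with
      | nil => simp [rep2]
      | cons c t =>
          cases t with
          | nil =>
              have hpre : ([a,b].isPrefixOf [c]) = false := by
                simp [List.isPrefixOf]
              simp only [hpre, Bool.false_eq_true, if_false]
              rw [ih [] (c :: acc) (by simp)]
              simp [rep2_one, rep2]
          | cons y t2 =>
              by_cases hm : c = a ∧ y = b
              · have hpre : ([a,b].isPrefixOf (c :: y :: t2)) = true := by
                  simp [List.isPrefixOf, hm.1.symm, hm.2.symm]
                simp only [hpre, if_true, List.length_cons, List.drop_succ_cons, List.drop_zero, List.length_nil]
                rw [ih t2 ([r].reverse ++ acc) (by simp at h ⊢; omega)]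
                rw [rep2_cons₂, if_pos hm]
                simp
              · have hpre : ([a,b].isPrefixOf (c :: y :: t2)) = false := by
                  simp [List.isPrefixOf]
                  intro h1 h2; exact hm ⟨h1.symm, h2.symm⟩
                simp only [hpre, Bool.false_eq_true, if_false]
                rw [ih (y :: t2) (c :: acc) (by simp at h ⊢; omega)]
                rw [rep2_cons₂, if_neg hm]
                simp

lemma replace_eq_rep2 (a b r : Char) (s : List Char) :
    PySem.Chars.replace s [a, b] [r] = rep2 a b r s := by
  rw [PySem.Chars.replace]
  simp only [List.isEmpty_cons, Bool.false_eq_true, if_false]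
  exact go_eq_rep2 a b r s.length s [] (le_refl _)


def lit (c : Char) : Bool := !(c == '|' || c == '*' || c == '+' || c == '?' || c == '(' || c == ')')
def wrapF (c : Char) : List Char := if lit c then ['•', c, '•'] else [c]
def T0 (l : List Char) : List Char := l.flatMap wrapF
def T1 (p : Bool) : List Char → List Char
  | [] => []
  | c :: t =>
    if lit c then (if p then [] else ['•']) ++ c :: '•' :: T1 false t
    else c :: T1 (c == '(') t

lemma rep2_cons_fst (a b r x : Char) (xs : List Char) (h : x ≠ a) :
    rep2 a b r (x :: xs) = x :: rep2 a b r xs := by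
  cases xs with
  | nil => simp [rep2]
  | cons y t => rw [rep2_cons₂, if_neg]; rintro ⟨h1, _⟩; exact h h1

lemma rep2_cons_snd (a b r x : Char) (xs : List Char) (h : xs.head? ≠ some b) :
    rep2 a b r (x :: xs) = x :: rep2 a b r xs := by
  cases xs with
  | nil => simp [rep2]
  | cons y t => rw [rep2_cons₂, if_neg]; rintro ⟨_, h2⟩; exact h (by simp [h2])

lemma T1_flag (p q : Bool) (c : Char) (t : List Char) (h : lit c = false) :
    T1 p (c :: t) = T1 q (c :: t) := by rw [T1, T1]; simp [h]

lemma stage1 : ∀ (n : Nat) (l : List Char), l.length ≤ n →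
    rep2 '(' '•' '(' (T0 l ++ [')']) = T1 false l ++ [')'] := by
  intro n
  induction n with
  | zero =>
      intro l h
      have : l = [] := by cases l <;> simp_all
      subst this; decide
  | succ n ih =>
      intro l h
      cases l with
      | nil => decide
      | cons c t =>
          by_cases hc : lit c
          · have hT0 : T0 (c :: t) = '•' :: c :: '•' :: T0 t := by simp [T0, wrapF, hc]
            have hcne : c ≠ '(' := by intro e; subst e; simp [lit] at hc
            rw [hT0]
            simp only [List.cons_append]
            rw [rep2_cons_fst '(' '•' '(' '•' _ (by decide), rep2_cons_fst '(' '•' '(' c _ hcne,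
                rep2_cons_fst '(' '•' '(' '•' _ (by decide), ih t (by simp at h ⊢; omega)]
            rw [T1]; simp [hc]
          · by_cases hcp : c = '('
            · subst hcp
              cases t with
              | nil => decide
              | cons d t' =>
                  by_cases hd : lit d
                  · have hT0 : T0 ('(' :: d :: t') = '(' :: '•' :: d :: '•' :: T0 t' := by
                      simp [T0, wrapF, hc, hd]
                    have hdne : d ≠ '(' := by intro e; subst e; simp [lit] at hd
                    rw [hT0]
                    simp only [List.cons_append]
                    rw [rep2_cons₂, if_pos ⟨rfl, rfl⟩, rep2_cons_fst '(' '•' '(' d _ hdne,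
                        rep2_cons_fst '(' '•' '(' '•' _ (by decide), ih t' (by simp at h ⊢; omega)]
                    simp [T1, hc, hd]
                  · have hdb : d ≠ '•' := by intro e; subst e; simp [lit] at hd
                    have hT0 : T0 ('(' :: d :: t') = '(' :: T0 (d :: t') := by simp [T0, wrapF, hc]
                    have hT0d : T0 (d :: t') = d :: T0 t' := by simp [T0, wrapF, hd]
                    rw [hT0, hT0d]
                    simp only [List.cons_append]
                    rw [rep2_cons₂, if_neg (by rintro ⟨_, h2⟩; exact hdb h2)]
                    rw [show d :: (T0 t' ++ [')']) = T0 (d :: t') ++ [')'] by rw [hT0d]; simp]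
                    rw [ih (d :: t') (by simp at h ⊢; omega)]
                    simp [T1, hc, hd]
            · have hT0 : T0 (c :: t) = c :: T0 t := by simp [T0, wrapF, hc]
              rw [hT0]
              simp only [List.cons_append]
              rw [rep2_cons_fst '(' '•' '(' c _ hcp, ih t (by simp at h ⊢; omega)]
              have hbe : (c == '(') = false := by simp [hcp]
              simp [T1, hc, hbe]

lemma stage1_full (l : List Char) :
    rep2 '(' '•' '(' ('(' :: T0 l ++ [')']) = '(' :: T1 true l ++ [')'] := by
  cases l with
  | nil => decide
  | cons c t =>
      by_cases hc : lit c
      · have hT0 : T0 (c :: t) = '•' :: c :: '•' :: T0 t := by simp [T0, wrapF, hc]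
        have hcne : c ≠ '(' := by intro e; subst e; simp [lit] at hc
        rw [hT0]
        simp only [List.cons_append]
        rw [rep2_cons₂, if_pos ⟨rfl, rfl⟩, rep2_cons_fst '(' '•' '(' c _ hcne,
            rep2_cons_fst '(' '•' '(' '•' _ (by decide), stage1 t.length t (le_refl _)]
        rw [T1]; simp [hc]
      · have hcb : c ≠ '•' := by intro e; subst e; simp [lit] at hc
        have hT0 : T0 (c :: t) = c :: T0 t := by simp [T0, wrapF, hc]
        rw [hT0]
        simp only [List.cons_append]
        rw [rep2_cons₂, if_neg (by rintro ⟨_, h2⟩; exact hcb h2)]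
        rw [show c :: (T0 t ++ [')']) = T0 (c :: t) ++ [')'] by rw [hT0]; simp]
        rw [stage1 _ _ (le_refl _)]
        rw [T1_flag true false c t (by simpa using hc)]

def T2 (p : Bool) : List Char → List Char
  | [] => []
  | c :: t =>
    if lit c then
      (if p then [] else ['•']) ++ c ::
        (match t with
         | [] => []
         | d :: t' => if d = ')' then ')' :: T2 false t' else '•' :: T2 false (d :: t'))
    else c :: T2 (c == '(') t

lemma stage2 : ∀ (n : Nat) (l : List Char) (p : Bool), l.length ≤ n → '•' ∉ l →
    rep2 '•' ')' ')' (T1 p l ++ [')']) = T2 p l ++ [')'] := by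
  intro n
  induction n with
  | zero =>
      intro l p h hb
      have : l = [] := by cases l <;> simp_all
      subst this; cases p <;> decide
  | succ n ih =>
      intro l p h hb
      cases l with
      | nil => cases p <;> decide
      | cons c t =>
          have hcb : c ≠ '•' := by simp at hb; exact fun e => hb.1 e.symm
          have hbt : '•' ∉ t := by simp at hb; exact hb.2
          by_cases hc : lit c
          · have hcr : c ≠ ')' := by intro e; subst e; simp [lit] at hc
            have lead : ∀ rest : List Char,
                rep2 '•' ')' ')' ((if p then [] else ['•']) ++ c :: '•' :: rest) =
                (if p then [] else ['•']) ++ c :: rep2 '•' ')' ')' ('•' :: rest) := by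
              intro rest
              cases p with
              | true =>
                  simp only [if_true, List.nil_append]
                  exact rep2_cons_fst '•' ')' ')' c _ hcb
              | false =>
                  simp only [Bool.false_eq_true, if_false, List.cons_append, List.nil_append]
                  rw [rep2_cons_snd '•' ')' ')' '•' _ (by simp [hcr]),
                      rep2_cons_fst '•' ')' ')' c _ hcb]
            have hT1 : T1 p (c :: t) ++ [')'] =
                (if p then [] else ['•']) ++ c :: '•' :: (T1 false t ++ [')']) := by
              simp [T1, hc]
            rw [hT1, lead (T1 false t ++ [')'])]
            cases t with
            | nil =>
                rw [show rep2 '•' ')' ')' ('•' :: (T1 false [] ++ [')'])) = [')'] by decide]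
                have hT2 : T2 p [c] = (if p then [] else ['•']) ++ [c] := by simp [T2, hc]
                rw [hT2]; simp
            | cons d t' =>
                have hdb : d ≠ '•' := by simp at hbt; exact fun e => hbt.1 e.symm
                have hbt' : '•' ∉ t' := by simp at hbt; exact hbt.2
                by_cases hdr : d = ')'
                · subst hdr
                  have e1 : T1 false (')' :: t') = ')' :: T1 false t' := by
                    have : lit ')' = false := by decide
                    simp [T1, this]
                  rw [e1]
                  rw [show ('•' :: ((')' :: T1 false t') ++ [')'])) = '•' :: ')' :: (T1 false t' ++ [')'])
                      by simp]
                  rw [rep2_cons₂, if_pos (⟨rfl, rfl⟩ : '•' = '•' ∧ (')' : Char) = ')'),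
                      ih t' false (by simp at h ⊢; omega) hbt']
                  have hT2 : T2 p (c :: ')' :: t') = (if p then [] else ['•']) ++ c :: ')' :: T2 false t' := by
                    simp [T2, hc]
                  rw [hT2]; simp
                · have hhead : ((T1 false (d :: t') ++ [')']).head? ≠ some ')') := by
                    by_cases hd : lit d <;> simp [T1, hd, hdr]
                  rw [rep2_cons_snd '•' ')' ')' '•' _ hhead,
                      ih (d :: t') false (by simp at h ⊢; omega) hbt]
                  have hT2 : T2 p (c :: d :: t') =
                      (if p then [] else ['•']) ++ c :: '•' :: T2 false (d :: t') := by
                    simp [T2, hc, hdr]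
                  rw [hT2]; simp
          · have hT1 : T1 p (c :: t) = c :: T1 (c == '(') t := by
              rw [T1.eq_def]; simp [hc]
            have hT2 : T2 p (c :: t) = c :: T2 (c == '(') t := by
              rw [T2.eq_def]; simp [hc]
            rw [hT1, hT2]
            simp only [List.cons_append]
            rw [rep2_cons_fst '•' ')' ')' c _ hcb, ih t (c == '(') (by simp at h ⊢; omega) hbt]

def B3 (p : Bool) : List Char → List Char
  | [] => []
  | c :: t =>
    if lit c then
      (if p then [] else ['•']) ++ c ::
        (match t with
         | [] => []
         | d :: t' => if d = ')' then ')' :: B3 false t' else '•' :: B3 true (d :: t'))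
    else c :: B3 (c == '(') t

lemma stage3 : ∀ (n : Nat),
    (∀ (l : List Char) (p : Bool), l.length ≤ n → '•' ∉ l →
      rep2 '•' '•' '•' (T2 p l ++ [')']) = B3 p l ++ [')']) ∧
    (∀ (l : List Char), l.length ≤ n → '•' ∉ l →
      rep2 '•' '•' '•' ('•' :: (T2 false l ++ [')'])) = '•' :: (B3 true l ++ [')'])) := by
  intro n
  induction n with
  | zero =>
      constructor
      · intro l p h hb
        have : l = [] := by cases l <;> simp_all
        subst this; cases p <;> decide
      · intro l h hb
        have : l = [] := by cases l <;> simp_all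
        subst this; decide
  | succ n ih =>
      obtain ⟨ihP, ihQ⟩ := ih
      have hP : ∀ (l : List Char) (p : Bool), l.length ≤ n + 1 → '•' ∉ l →
          rep2 '•' '•' '•' (T2 p l ++ [')']) = B3 p l ++ [')'] := by
        intro l p h hb
        cases l with
        | nil => cases p <;> decide
        | cons c t =>
            have hcb : c ≠ '•' := by simp at hb; exact fun e => hb.1 e.symm
            have hbt : '•' ∉ t := by simp at hb; exact hb.2
            by_cases hc : lit c
            · have leadB : ∀ rest : List Char,
                  rep2 '•' '•' '•' ((if p then [] else ['•']) ++ c :: rest) =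
                  (if p then [] else ['•']) ++ c :: rep2 '•' '•' '•' rest := by
                intro rest
                cases p with
                | true =>
                    simp only [if_true, List.nil_append]
                    exact rep2_cons_fst '•' '•' '•' c _ hcb
                | false =>
                    simp only [Bool.false_eq_true, if_false, List.cons_append, List.nil_append]
                    rw [rep2_cons_snd '•' '•' '•' '•' _ (by simp [hcb]),
                        rep2_cons_fst '•' '•' '•' c _ hcb]
              cases t with
              | nil =>
                  have hT2 : T2 p [c] = (if p then [] else ['•']) ++ [c] := by simp [T2, hc]
                  have hB3 : B3 p [c] = (if p then [] else ['•']) ++ [c] := by simp [B3, hc]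
                  rw [hT2, hB3]
                  simp only [List.append_assoc, List.cons_append, List.nil_append]
                  rw [leadB [')']]
                  rw [show rep2 '•' '•' '•' [')'] = [')'] from rep2_one _ _ _ _]
              | cons d t' =>
                  have hbt' : '•' ∉ t' := by simp at hbt; exact hbt.2
                  by_cases hdr : d = ')'
                  · subst hdr
                    have hT2 : T2 p (c :: ')' :: t') =
                        (if p then [] else ['•']) ++ c :: ')' :: T2 false t' := by simp [T2, hc]
                    have hB3 : B3 p (c :: ')' :: t') =
                        (if p then [] else ['•']) ++ c :: ')' :: B3 false t' := by simp [B3, hc]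
                    rw [hT2, hB3]
                    simp only [List.append_assoc, List.cons_append, List.nil_append]
                    rw [leadB (')' :: (T2 false t' ++ [')'])),
                        rep2_cons_fst '•' '•' '•' ')' _ (by decide),
                        ihP t' false (by simp at h ⊢; omega) hbt']
                  · have hT2 : T2 p (c :: d :: t') =
                        (if p then [] else ['•']) ++ c :: '•' :: T2 false (d :: t') := by
                      simp [T2, hc, hdr]
                    have hB3 : B3 p (c :: d :: t') =
                        (if p then [] else ['•']) ++ c :: '•' :: B3 true (d :: t') := by
                      simp [B3, hc, hdr]
                    rw [hT2, hB3]
                    simp only [List.append_assoc, List.cons_append, List.nil_append]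
                    rw [leadB ('•' :: (T2 false (d :: t') ++ [')'])),
                        ihQ (d :: t') (by simp at h ⊢; omega) hbt]
            · have hT2 : T2 p (c :: t) = c :: T2 (c == '(') t := by
                rw [T2.eq_def]; simp [hc]
              have hB3 : B3 p (c :: t) = c :: B3 (c == '(') t := by
                rw [B3.eq_def]; simp [hc]
              rw [hT2, hB3]
              simp only [List.cons_append]
              rw [rep2_cons_fst '•' '•' '•' c _ hcb,
                  ihP t (c == '(') (by simp at h ⊢; omega) hbt]
      refine ⟨hP, ?_⟩
      intro l h hb
      cases l with
      | nil => decide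
      | cons d t =>
          have hdb : d ≠ '•' := by simp at hb; exact fun e => hb.1 e.symm
          have hbt : '•' ∉ t := by simp at hb; exact hb.2
          by_cases hd : lit d
          · cases t with
            | nil =>
                have hT2 : T2 false [d] = ['•', d] := by simp [T2, hd]
                have hB3 : B3 true [d] = [d] := by simp [B3, hd]
                rw [hT2, hB3]
                simp only [List.cons_append, List.nil_append]
                rw [rep2_cons₂, if_pos (⟨rfl, rfl⟩ : '•' = '•' ∧ '•' = '•'),
                    rep2_cons_fst '•' '•' '•' d _ hdb,
                    show rep2 '•' '•' '•' [')'] = [')'] from rep2_one _ _ _ _]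
            | cons e t'' =>
                have hbt'' : '•' ∉ t'' := by simp at hbt; exact hbt.2
                by_cases her : e = ')'
                · subst her
                  have hT2 : T2 false (d :: ')' :: t'') = '•' :: d :: ')' :: T2 false t'' := by
                    simp [T2, hd]
                  have hB3 : B3 true (d :: ')' :: t'') = d :: ')' :: B3 false t'' := by
                    simp [B3, hd]
                  rw [hT2, hB3]
                  simp only [List.cons_append]
                  rw [rep2_cons₂, if_pos (⟨rfl, rfl⟩ : '•' = '•' ∧ '•' = '•'),
                      rep2_cons_fst '•' '•' '•' d _ hdb,
                      rep2_cons_fst '•' '•' '•' ')' _ (by decide),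
                      ihP t'' false (by simp at h ⊢; omega) hbt'']
                · have hT2 : T2 false (d :: e :: t'') = '•' :: d :: '•' :: T2 false (e :: t'') := by
                    simp [T2, hd, her]
                  have hB3 : B3 true (d :: e :: t'') = d :: '•' :: B3 true (e :: t'') := by
                    simp [B3, hd, her]
                  rw [hT2, hB3]
                  simp only [List.cons_append]
                  rw [rep2_cons₂, if_pos (⟨rfl, rfl⟩ : '•' = '•' ∧ '•' = '•'),
                      rep2_cons_fst '•' '•' '•' d _ hdb,
                      ihQ (e :: t'') (by simp at h ⊢; omega) hbt]
          · have hT2 : T2 false (d :: t) = d :: T2 (d == '(') t := by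
              rw [T2.eq_def]; simp [hd]
            have hB3 : B3 true (d :: t) = d :: B3 (d == '(') t := by
              rw [B3.eq_def]; simp [hd]
            rw [hT2, hB3]
            simp only [List.cons_append]
            rw [rep2_cons_snd '•' '•' '•' '•' _ (by simp [hdb]),
                rep2_cons_fst '•' '•' '•' d _ hdb,
                ihP t (d == '(') (by simp at h ⊢; omega) hbt]


-- ===== A-side chain lemmas =====

lemma join_nil_flatten : ∀ (parts : List (List Char)), PySem.Chars.join [] parts = parts.flatten := by
  intro parts
  induction parts with
  | nil => simp [PySem.Chars.join_nil]
  | cons p rest ih =>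
      cases rest with
      | nil => simp [PySem.Chars.join_singleton]
      | cons q rest' =>
          rw [PySem.Chars.join_cons_cons]
          simp only [List.flatten_cons, List.nil_append]
          rw [ih]
          simp [List.flatten_cons]

lemma wrap_eq (c : Char) :
    (if (c ∈ (['|', '*', '+', '?'] : List Char) ∨ c = '(' ∨ c = ')') then ([c] : List Char)
     else ['•', c, '•']) = wrapF c := by
  by_cases h : c ∈ (['|', '*', '+', '?'] : List Char) ∨ c = '(' ∨ c = ')'
  · rw [if_pos h]
    simp only [List.mem_cons, List.not_mem_nil, or_false] at h
    rcases h with ((h | h | h | h) | h | h) <;> subst h <;> decide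
  · rw [if_neg h]
    push_neg at h
    obtain ⟨h1, h2, h3⟩ := h
    simp only [List.mem_cons, List.not_mem_nil, or_false, not_or] at h1
    obtain ⟨a1, a2, a3, a4⟩ := h1
    have hl : lit c = true := by simp [lit, a1, a2, a3, a4, h2, h3]
    simp [wrapF, hl]

lemma T0_pad (l : List Char) : T0 (('(' :: l) ++ [')']) = '(' :: (T0 l ++ [')']) := by
  have w1 : wrapF '(' = ['('] := by decide
  have w2 : wrapF ')' = [')'] := by decide
  simp [T0, w1, w2]

lemma formato_eq_chain (entrada : String) :
    formato entrada = String.ofList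
      (PySem.List.slice
        (rep2 '•' '•' '•' (rep2 '•' ')' ')' (rep2 '(' '•' '(' ('(' :: (T0 entrada.toList ++ [')'])))))
        (some 1) (some (-1))) := by
  simp only [formato]
  rw [show PySem.List.len (('(' :: entrada.toList) ++ [')']) =
      ((('(' :: entrada.toList) ++ [')']).length : Int) from by simp]
  rw [show (fun (acc : List (List Char)) (i : Int) =>
        let c := PySem.List.pyGetD (('(' :: entrada.toList) ++ [')']) i ' '
        if c ∈ ['|', '*', '+', '?'] ∨ c = '(' ∨ c = ')' then acc ++ [[c]]
        else acc ++ [['•', c, '•']]) =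
      (fun (acc : List (List Char)) (i : Int) =>
        (fun (acc : List (List Char)) (c : Char) =>
          acc ++ [if c ∈ ['|', '*', '+', '?'] ∨ c = '(' ∨ c = ')' then [c] else ['•', c, '•']])
          acc (PySem.List.pyGetD (('(' :: entrada.toList) ++ [')']) i ' ')) from by
    funext acc i
    dsimp only
    split_ifs <;> rfl]
  rw [PySem.List.foldl_pyRange_zero_pyGetD' (('(' :: entrada.toList) ++ [')']) ' '
        (fun (acc : List (List Char)) (c : Char) =>
          acc ++ [if c ∈ ['|', '*', '+', '?'] ∨ c = '(' ∨ c = ')' then [c] else ['•', c, '•']]) []]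
  rw [PySem.List.foldl_append_singleton_eq_map
        (fun (c : Char) => if c ∈ ['|', '*', '+', '?'] ∨ c = '(' ∨ c = ')' then [c] else ['•', c, '•'])
        (('(' :: entrada.toList) ++ [')']) []]
  rw [List.nil_append]
  rw [show List.map
        (fun (c : Char) => if c ∈ ['|', '*', '+', '?'] ∨ c = '(' ∨ c = ')' then [c] else ['•', c, '•'])
        (('(' :: entrada.toList) ++ [')']) =
      List.map wrapF (('(' :: entrada.toList) ++ [')']) from
    List.map_congr_left (fun c _ => wrap_eq c)]
  rw [join_nil_flatten]
  rw [show (List.map wrapF (('(' :: entrada.toList) ++ [')'])).flatten =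
      T0 (('(' :: entrada.toList) ++ [')']) from by simp [T0, List.flatMap_def]]
  rw [T0_pad]
  rw [replace_eq_rep2, replace_eq_rep2, replace_eq_rep2]
  rw [show ∀ cs : List Char, PySem.Chars.slice cs (some 1) (some (-1)) =
      PySem.List.slice cs (some 1) (some (-1)) from fun cs => by
    simp [PySem.Chars.slice_eq_listSlice]]

-- ===== B-side lemmas =====

lemma mem_simbB (c : Char) : (c ∈ simbB) ↔ lit c = false := by
  simp [simbB, lit]
  tauto

def B3tail : List Char → List Char
  | [] => []
  | d :: t' => if d = ')' then ')' :: B3 false t' else '•' :: B3 true (d :: t')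

lemma B3_lit (p : Bool) (c : Char) (t : List Char) (hc : lit c = true) :
    B3 p (c :: t) = (if p then [] else ['•']) ++ c :: B3tail t := by
  cases t with
  | nil => simp [B3, B3tail, hc]
  | cons d t' => by_cases hdr : d = ')' <;> simp [B3, B3tail, hc, hdr]

lemma B3_nonlit (p : Bool) (c : Char) (t : List Char) (hc : lit c = false) :
    B3 p (c :: t) = c :: B3 (c == '(') t := by
  rw [B3.eq_def]; simp [hc]

lemma altGo_some : ∀ (t : List Char) (c : Char),
    altGo (some c) t = if lit c then B3tail t else B3 (c == '(') t := by
  intro t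
  induction t with
  | nil => intro c; by_cases hc : lit c <;> simp [altGo, B3tail, B3, hc]
  | cons d t' ih =>
      intro c
      rw [show altGo (some c) (d :: t') =
          (if (c ∉ simbB ∨ d ∉ simbB) ∧ c ≠ '(' ∧ d ≠ ')' then ['•'] else []) ++
            d :: altGo (some d) t' from by simp [altGo]]
      rw [ih d]
      by_cases hc : lit c
      · have hcp : c ≠ '(' := by intro e; subst e; simp [lit] at hc
        rw [if_pos hc]
        by_cases hdr : d = ')'
        · subst hdr
          have hins : ¬((c ∉ simbB ∨ (')' : Char) ∉ simbB) ∧ c ≠ '(' ∧ (')' : Char) ≠ ')') := by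
            rintro ⟨-, -, h3⟩; exact h3 rfl
          have hld : lit ')' = false := by decide
          rw [if_neg hins, show B3tail (')' :: t') = ')' :: B3 false t' from by simp [B3tail]]
          rw [if_neg (by simp [hld] : ¬lit ')' = true)]
          rw [show ((')' : Char) == '(') = false from by decide]
          simp
        · have hins : (c ∉ simbB ∨ d ∉ simbB) ∧ c ≠ '(' ∧ d ≠ ')' := by
            refine ⟨Or.inl ?_, hcp, hdr⟩
            rw [mem_simbB]; simp [hc]
          rw [if_pos hins, show B3tail (d :: t') = '•' :: B3 true (d :: t') from by
            simp [B3tail, hdr]]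
          simp only [List.cons_append, List.nil_append]
          congr 1
          by_cases hd : lit d
          · rw [B3_lit true d t' hd, if_pos hd]
            simp
          · rw [B3_nonlit true d t' (by simpa using hd), if_neg hd]
      · rw [if_neg hc]
        by_cases hd : lit d
        · have hdp : d ≠ ')' := by intro e; subst e; simp [lit] at hd
          rw [B3_lit (c == '(') d t' hd, if_pos hd]
          by_cases hcp : c = '('
          · subst hcp
            have hins : ¬((('(' : Char) ∉ simbB ∨ d ∉ simbB) ∧ ('(' : Char) ≠ '(' ∧ d ≠ ')') := by
              rintro ⟨-, h2, -⟩; exact h2 rfl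
            rw [if_neg hins, show (('(' : Char) == '(') = true from by decide]
            simp
          · have hins : (c ∉ simbB ∨ d ∉ simbB) ∧ c ≠ '(' ∧ d ≠ ')' := by
              refine ⟨Or.inr ?_, hcp, hdp⟩
              rw [mem_simbB]; simp [hd]
            rw [if_pos hins, show (c == '(') = false from by simp [hcp]]
            simp
        · have hins : ¬((c ∉ simbB ∨ d ∉ simbB) ∧ c ≠ '(' ∧ d ≠ ')') := by
            rintro ⟨h1, -, -⟩
            rcases h1 with h1 | h1
            · exact h1 ((mem_simbB c).mpr (by simpa using hc))
            · exact h1 ((mem_simbB d).mpr (by simpa using hd))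
          rw [if_neg hins, B3_nonlit (c == '(') d t' (by simpa using hd), if_neg hd]
          simp

lemma altGo_none (l : List Char) : altGo none l = B3 true l := by
  cases l with
  | nil => simp [altGo, B3]
  | cons c t =>
      rw [show altGo none (c :: t) = c :: altGo (some c) t from by simp [altGo]]
      rw [altGo_some t c]
      by_cases hc : lit c
      · rw [if_pos hc, B3_lit true c t hc]
        simp
      · rw [if_neg hc, B3_nonlit true c t (by simpa using hc)]

lemma slice_strip (m : List Char) :
    PySem.List.slice ('(' :: m ++ [')']) (some 1) (some (-1)) = m := by
  simp [PySem.List.slice, PySem.List.clampIdx]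
  rw [if_neg (by omega)]
  simp [List.take_left']

-- ===== VERDICT (by name: the statement is the Claim_ definition above) =====
theorem formato_spec : Claim_equal_formato := by
  intro entrada hdom
  unfold Spec_formato
  have hb : '•' ∉ entrada.toList := by
    intro hmem
    unfold Dom_formato pvDomStr at hdom
    rw [List.all_eq_true] at hdom
    have := hdom _ hmem
    exact absurd this (by decide)
  rw [formato_eq_chain entrada]
  rw [show ('(' : Char) :: (T0 entrada.toList ++ [')']) = ('(' :: T0 entrada.toList) ++ [')'] from by
    simp]
  rw [stage1_full entrada.toList]
  rw [show ('(' :: T1 true entrada.toList ++ [')']) = '(' :: (T1 true entrada.toList ++ [')']) from rfl]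
  rw [rep2_cons_fst '•' ')' ')' '(' _ (by decide)]
  rw [stage2 entrada.toList.length entrada.toList true (le_refl _) hb]
  rw [rep2_cons_fst '•' '•' '•' '(' _ (by decide)]
  rw [(stage3 entrada.toList.length).1 entrada.toList true (le_refl _) hb]
  rw [show ('(' :: (B3 true entrada.toList ++ [')'])) = '(' :: B3 true entrada.toList ++ [')'] from rfl]
  rw [slice_strip (B3 true entrada.toList)]
  unfold formato_alt
  rw [altGo_none entrada.toList]
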